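-- pv_equiv track=rewrite | github.com/jakubjadczak/django_sorting | alg_codes/sorting_algs.py | heap2
-- ===== SOURCE A (Python) =====
-- def heap2(list, n, i):
--     comp = 0
--     swap = 0
--     dad = i
--     l = 2*i + 1
--     r = 2*i + 2
--
--     if l < n and list[i] > list[l]:
--         comp += 1
--         dad = l
--
--     if r < n and list[dad] > list[r]:
--         comp += 1
--         dad = r
--
--     if dad != i:
--         swap += 1
--         list[i], list[dad] = list[dad], list[i]
--         list, p, z = heap2(list, n, dad)
--         comp += p
--         swap += z
--     return list, comp, swap
-- ===== SOURCE B (Python) =====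
-- def heap2(list, n, i):
--     # "Hole" sift-down: first walk down recording the path of chosen children
--     # (no mutation), then shift each child up one level and drop the root value
--     # into the final hole -- instead of A's swap-and-recurse.
--     comp = 0
--     j = i
--     path = []
--     while 2*j + 1 < n:
--         v = list[i]
--         l, r = 2*j + 1, 2*j + 2
--         c = j
--         if v > list[l]:
--             comp += 1
--             c = l
--         if r < n and (v if c == j else list[c]) > list[r]:
--             comp += 1
--             c = r
--         if c == j:
--             break
--         path.append(c)
--         j = c
--     if path:
--         v = list[i]
--         prev = i
--         for p in path:
--             list[prev] = list[p]
--             prev = p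
--         list[prev] = v
--     return list, comp, len(path)
-- ===== Notes on version B (the rewrite author's own statement) =====
-- stated objective: alternative
-- what changed: A's swap-and-recurse sift-down is replaced by the classic 'hole' method: a first non-mutating pass records the path of chosen children (counting comparisons), then a second pass shifts each child up one level and drops the root value into the final hole, so no intermediate swaps are performed.
-- outside the precondition, e.g. on heap2([-2, 0], 2, -1): A returns ([-2, 0], 2, 2), B returns ([0, -2], 1, 1); on heap2([3, 1, 2], 5, 0): A raises IndexError, B raises IndexError
import Mathlib
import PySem

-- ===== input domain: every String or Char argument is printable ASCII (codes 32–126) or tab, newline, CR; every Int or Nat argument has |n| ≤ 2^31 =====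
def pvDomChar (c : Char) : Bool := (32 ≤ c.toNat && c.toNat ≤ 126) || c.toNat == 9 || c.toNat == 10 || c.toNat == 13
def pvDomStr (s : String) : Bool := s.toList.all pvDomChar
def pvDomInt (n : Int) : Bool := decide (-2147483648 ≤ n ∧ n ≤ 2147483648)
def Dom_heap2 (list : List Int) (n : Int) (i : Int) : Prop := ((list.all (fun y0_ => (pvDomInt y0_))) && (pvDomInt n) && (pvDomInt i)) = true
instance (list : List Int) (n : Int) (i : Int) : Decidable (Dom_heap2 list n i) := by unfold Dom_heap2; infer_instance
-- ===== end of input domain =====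

-- B replaces A's swap-and-recurse sift-down by the "hole" method: a non-mutating pass that
-- records the path of chosen children, then one shifting pass that moves each child up a level
-- and drops the root value into the final hole (same in-place mutation of `list` as A in Python;
-- the equivalence proved is about the returned triple).

-- ===== PORT A =====
-- Recursion is modelled with fuel (list.length + 1 is enough for every run admitted by Pre_);
-- pyGetD / pySetD are Python indexing and item assignment, exact under Pre_ (all indices in range).
def heap2Go : Nat → List Int → Int → Int → List Int × Int × Int
  | 0, list, _, _ => (list, 0, 0)      -- fuel guard only; never reached under Pre_
  | fuel+1, list, n, i =>
    let l := 2*i + 1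
    let r := 2*i + 2
    -- if l < n and list[i] > list[l]: comp += 1; dad = l
    let (comp₁, dad₁) :=
      if l < n ∧ PySem.List.pyGetD list i 0 > PySem.List.pyGetD list l 0
      then ((1 : Int), l) else (0, i)
    -- if r < n and list[dad] > list[r]: comp += 1; dad = r
    let (comp₂, dad₂) :=
      if r < n ∧ PySem.List.pyGetD list dad₁ 0 > PySem.List.pyGetD list r 0
      then (comp₁ + 1, r) else (comp₁, dad₁)
    if dad₂ ≠ i then
      -- list[i], list[dad] = list[dad], list[i]
      let vi := PySem.List.pyGetD list i 0
      let vd := PySem.List.pyGetD list dad₂ 0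
      let list' := PySem.List.pySetD (PySem.List.pySetD list i vd) dad₂ vi
      let t := heap2Go fuel list' n dad₂   -- (list, p, z)
      (t.1, comp₂ + t.2.1, 1 + t.2.2)
    else (list, comp₂, 0)

def heap2 (list : List Int) (n : Int) (i : Int) : List Int × Int × Int :=
  heap2Go (list.length + 1) list n i

-- ===== PORT B =====
-- phase 1 (the while loop of Source B): walk down WITHOUT mutating, returning the path of chosen
-- children and the comparison count; v is the root value list[i], constant during the walk.
def heap2AltPath : Nat → List Int → Int → Int → Int → List Int × Int
  | 0, _, _, _, _ => ([], 0)           -- fuel guard only; never reached under Pre_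
  | fuel+1, list, n, j, v =>
    if 2*j + 1 < n then
      let l := 2*j + 1
      let r := 2*j + 2
      let (comp₁, c₁) := if v > PySem.List.pyGetD list l 0 then ((1 : Int), l) else (0, j)
      let (comp₂, c) :=
        if r < n ∧ (if c₁ = j then v else PySem.List.pyGetD list c₁ 0) > PySem.List.pyGetD list r 0
        then (comp₁ + 1, r) else (comp₁, c₁)
      if c = j then ([], comp₂)
      else
        let t := heap2AltPath fuel list n c v
        (c :: t.1, comp₂ + t.2)
    else ([], 0)

-- phase 2 (the for loop of Source B): shift each child on the path up one level, drop v in the hole.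
def heap2AltApply : List Int → Int → List Int → Int → List Int
  | list, prev, [], v => PySem.List.pySetD list prev v
  | list, prev, p :: rest, v =>
      heap2AltApply (PySem.List.pySetD list prev (PySem.List.pyGetD list p 0)) p rest v

def heap2_alt (list : List Int) (n : Int) (i : Int) : List Int × Int × Int :=
  let v := PySem.List.pyGetD list i 0
  let t := heap2AltPath (list.length + 1) list n i v
  ((if t.1 = [] then list else heap2AltApply list i t.1 v), t.2, (t.1.length : Int))

-- ===== PRECONDITION & SPEC =====
-- Pre_ is sift-down's call contract: either the node index is nonnegative and the heap size fits the
-- list, or the node has no child inside the heap (n ≤ 2i+1, so A touches nothing and returns at once).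
-- Outside it A either raises IndexError or (for some negative i admitted by n > 2i+1) returns a value
-- produced by negative-index wraparound, a corner no caller of a heapify helper relies on.
def Pre_heap2 (list : List Int) (n : Int) (i : Int) : Prop :=
  (0 ≤ i ∧ n ≤ list.length) ∨ n ≤ 2*i + 1
instance (list : List Int) (n : Int) (i : Int) : Decidable (Pre_heap2 list n i) := by unfold Pre_heap2; infer_instance
def pvWitness_heap2 : List Int × Int × Int := ([5, 3, 4, 1, 2], 5, 0)
def Spec_heap2 (list : List Int) (n : Int) (i : Int) (out : List Int × Int × Int) : Prop := out = heap2_alt list n i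
instance (list : List Int) (n : Int) (i : Int) (out : List Int × Int × Int) : Decidable (Spec_heap2 list n i out) := by unfold Spec_heap2; infer_instance

-- ===== CLAIM (what is proved, stated in full; the proofs are below) =====
def Claim_equal_heap2 : Prop := ∀ (list : List Int) (n : Int) (i : Int), Dom_heap2 list n i → Pre_heap2 list n i → Spec_heap2 list n i (heap2 list n i)

-- ===== LEMMAS AND PROOFS =====

-- reading an untouched (distinct, nonnegative) index through a pySetD
theorem pv_get_set_ne (xs : List Int) (a k w d : Int) (ha : 0 ≤ a) (hk : 0 ≤ k) (hne : k ≠ a) :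
    PySem.List.pyGetD (PySem.List.pySetD xs a w) k d = PySem.List.pyGetD xs k d := by
  rw [PySem.List.pySetD_of_nonneg xs w ha, PySem.List.pyGetD_of_nonneg (xs.set a.toNat w) d hk,
      PySem.List.pyGetD_of_nonneg xs d hk]
  have h : a.toNat ≠ k.toNat := by omega
  simp [List.getD, List.getElem?_set_ne h]

theorem pv_get_set_self (xs : List Int) (a w d : Int) (ha : 0 ≤ a) (hlen : a < (xs.length : Int)) :
    PySem.List.pyGetD (PySem.List.pySetD xs a w) a d = w := by
  rw [PySem.List.pySetD_of_nonneg xs w ha, PySem.List.pyGetD_of_nonneg (xs.set a.toNat w) d ha]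
  have h : a.toNat < xs.length := by omega
  simp [List.getD, h]

-- overwriting a write at the same (nonnegative) index
theorem pv_set_set (xs : List Int) (a w1 w2 : Int) (ha : 0 ≤ a) :
    PySem.List.pySetD (PySem.List.pySetD xs a w1) a w2 = PySem.List.pySetD xs a w2 := by
  rw [PySem.List.pySetD_of_nonneg xs w1 ha, PySem.List.pySetD_of_nonneg (xs.set a.toNat w1) w2 ha,
      PySem.List.pySetD_of_nonneg xs w2 ha, List.set_set]

-- phase 1 only reads the list strictly below the current node
theorem heap2AltPath_congr (fuel : Nat) :
    ∀ (l1 l2 : List Int) (n j v : Int), 0 ≤ j →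
    (∀ k : Int, j < k → PySem.List.pyGetD l1 k 0 = PySem.List.pyGetD l2 k 0) →
    heap2AltPath fuel l1 n j v = heap2AltPath fuel l2 n j v := by
  induction fuel with
  | zero => intro l1 l2 n j v _ _; rfl
  | succ fuel ih =>
    intro l1 l2 n j v hj h
    by_cases hln : 2*j + 1 < n
    · have h1 : PySem.List.pyGetD l1 (2*j+1) 0 = PySem.List.pyGetD l2 (2*j+1) 0 := h _ (by omega)
      have h2 : PySem.List.pyGetD l1 (2*j+2) 0 = PySem.List.pyGetD l2 (2*j+2) 0 := h _ (by omega)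
      have hlj : (2*j+1 : Int) ≠ j := by omega
      have hrj : (2*j+2 : Int) ≠ j := by omega
      by_cases c1 : v > PySem.List.pyGetD l2 (2*j+1) 0
      · by_cases c2 : 2*j+2 < n ∧ PySem.List.pyGetD l2 (2*j+1) 0 > PySem.List.pyGetD l2 (2*j+2) 0
        · have hrec := ih l1 l2 n (2*j+2) v (by omega) (fun k hk => h k (by omega))
          simp [heap2AltPath, hln, h1, h2, c1, c2, hlj, hrec]
        · have hrec := ih l1 l2 n (2*j+1) v (by omega) (fun k hk => h k (by omega))
          simp [heap2AltPath, hln, h1, h2, c1, c2, hlj, hrec]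
      · by_cases c2 : 2*j+2 < n ∧ v > PySem.List.pyGetD l2 (2*j+2) 0
        · have hrec := ih l1 l2 n (2*j+2) v (by omega) (fun k hk => h k (by omega))
          simp [heap2AltPath, hln, h1, h2, c1, c2, hrj, hrec]
        · simp [heap2AltPath, hln, h1, h2, c1, c2]
    · simp [heap2AltPath, hln]

-- every index on the path lies strictly below the node the walk starts at
theorem heap2AltPath_head (fuel : Nat) (list : List Int) (n j v : Int) (hj : 0 ≤ j) :
    ∀ p, (heap2AltPath fuel list n j v).1.head? = some p → j < p := by
  cases fuel with
  | zero => intro p hp; simp [heap2AltPath] at hp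
  | succ fuel =>
    intro p hp
    by_cases hln : 2*j + 1 < n
    · have hlj : (2*j+1 : Int) ≠ j := by omega
      have hrj : (2*j+2 : Int) ≠ j := by omega
      by_cases c1 : v > PySem.List.pyGetD list (2*j+1) 0
      · by_cases c2 : 2*j+2 < n ∧ PySem.List.pyGetD list (2*j+1) 0 > PySem.List.pyGetD list (2*j+2) 0
        · simp [heap2AltPath, hln, c1, c2, hlj, hrj] at hp; omega
        · simp [heap2AltPath, hln, c1, c2, hlj] at hp; omega
      · by_cases c2 : 2*j+2 < n ∧ v > PySem.List.pyGetD list (2*j+2) 0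
        · simp [heap2AltPath, hln, c1, c2, hrj] at hp; omega
        · simp [heap2AltPath, hln, c1, c2] at hp
    · simp [heap2AltPath, hln] at hp

-- one swap of A followed by its recursive call equals "cons the child onto the path"
theorem pv_step (fuel : Nat)
    (ih : ∀ (list : List Int) (n j : Int), 0 ≤ j → n ≤ (list.length : Int) →
      heap2Go fuel list n j =
        ((if (heap2AltPath fuel list n j (PySem.List.pyGetD list j 0)).1 = [] then list
          else heap2AltApply list j (heap2AltPath fuel list n j (PySem.List.pyGetD list j 0)).1
                 (PySem.List.pyGetD list j 0)),
         (heap2AltPath fuel list n j (PySem.List.pyGetD list j 0)).2,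
         ((heap2AltPath fuel list n j (PySem.List.pyGetD list j 0)).1.length : Int)))
    (list : List Int) (n j dad : Int)
    (hj : 0 ≤ j) (hn : n ≤ (list.length : Int)) (hjd : j < dad) (hdn : dad < n) :
    heap2Go fuel
        (PySem.List.pySetD (PySem.List.pySetD list j (PySem.List.pyGetD list dad 0)) dad
          (PySem.List.pyGetD list j 0)) n dad
      = (heap2AltApply list j (dad :: (heap2AltPath fuel list n dad (PySem.List.pyGetD list j 0)).1)
           (PySem.List.pyGetD list j 0),
         (heap2AltPath fuel list n dad (PySem.List.pyGetD list j 0)).2,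
         ((heap2AltPath fuel list n dad (PySem.List.pyGetD list j 0)).1.length : Int)) := by
  have hX : ((PySem.List.pySetD list j (PySem.List.pyGetD list dad 0)).length : Int)
      = (list.length : Int) := by simp [PySem.List.length_pySetD]
  have hlen' : n ≤ ((PySem.List.pySetD (PySem.List.pySetD list j (PySem.List.pyGetD list dad 0)) dad
      (PySem.List.pyGetD list j 0)).length : Int) := by
    simp only [PySem.List.length_pySetD]; omega
  have hv' : PySem.List.pyGetD (PySem.List.pySetD (PySem.List.pySetD list j
      (PySem.List.pyGetD list dad 0)) dad (PySem.List.pyGetD list j 0)) dad 0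
      = PySem.List.pyGetD list j 0 :=
    pv_get_set_self _ dad _ 0 (by omega) (by rw [hX]; omega)
  have hcongr : heap2AltPath fuel (PySem.List.pySetD (PySem.List.pySetD list j
      (PySem.List.pyGetD list dad 0)) dad (PySem.List.pyGetD list j 0)) n dad
        (PySem.List.pyGetD list j 0)
      = heap2AltPath fuel list n dad (PySem.List.pyGetD list j 0) := by
    refine heap2AltPath_congr fuel _ _ n dad _ (by omega) (fun k hk => ?_)
    rw [pv_get_set_ne _ dad k _ 0 (by omega) (by omega) (by omega),
        pv_get_set_ne list j k _ 0 hj (by omega) (by omega)]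
  have H := ih _ n dad (by omega) hlen'
  rw [hv', hcongr] at H
  rw [H]
  cases hP : (heap2AltPath fuel list n dad (PySem.List.pyGetD list j 0)).1 with
  | nil => simp [heap2AltApply]
  | cons p rest =>
    have hp : dad < p :=
      heap2AltPath_head fuel list n dad (PySem.List.pyGetD list j 0) (by omega) p
        (by rw [hP]; rfl)
    simp only [heap2AltApply, reduceCtorEq, ite_false]
    rw [pv_get_set_ne _ dad p _ 0 (by omega) (by omega) (by omega),
        pv_set_set _ dad _ _ (by omega)]

-- main invariant: A's recursion computes exactly "apply the path" plus the two counters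
theorem heap2Go_eq_path (fuel : Nat) :
    ∀ (list : List Int) (n j : Int), 0 ≤ j → n ≤ (list.length : Int) →
    heap2Go fuel list n j =
      ((if (heap2AltPath fuel list n j (PySem.List.pyGetD list j 0)).1 = [] then list
        else heap2AltApply list j (heap2AltPath fuel list n j (PySem.List.pyGetD list j 0)).1
               (PySem.List.pyGetD list j 0)),
       (heap2AltPath fuel list n j (PySem.List.pyGetD list j 0)).2,
       ((heap2AltPath fuel list n j (PySem.List.pyGetD list j 0)).1.length : Int)) := by
  induction fuel with
  | zero => intro list n j _ _; simp [heap2Go, heap2AltPath]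
  | succ fuel ih =>
    intro list n j hj hn
    by_cases hln : 2*j + 1 < n
    · have hlj : (2*j+1 : Int) ≠ j := by omega
      have hrj : (2*j+2 : Int) ≠ j := by omega
      by_cases c1 : PySem.List.pyGetD list j 0 > PySem.List.pyGetD list (2*j+1) 0
      · by_cases c2 : 2*j+2 < n ∧ PySem.List.pyGetD list (2*j+1) 0 > PySem.List.pyGetD list (2*j+2) 0
        · have hstep := pv_step fuel ih list n j (2*j+2) hj hn (by omega) c2.1
          simp [heap2Go, heap2AltPath, hln, c1, c2, hlj, hrj, hstep]
          ring
        · have hstep := pv_step fuel ih list n j (2*j+1) hj hn (by omega) hln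
          simp [heap2Go, heap2AltPath, hln, c1, c2, hlj, hstep]
          ring
      · by_cases c2 : 2*j+2 < n ∧ PySem.List.pyGetD list j 0 > PySem.List.pyGetD list (2*j+2) 0
        · have hstep := pv_step fuel ih list n j (2*j+2) hj hn (by omega) c2.1
          simp [heap2Go, heap2AltPath, hln, c1, c2, hrj, hstep]
          ring
        · simp [heap2Go, heap2AltPath, hln, c1, c2]
    · have hrn : ¬ (2*j+2 < n) := by omega
      simp [heap2Go, heap2AltPath, hln, hrn]

-- ===== VERDICT (by name: the statement is the Claim_ definition above) =====
theorem heap2_spec : Claim_equal_heap2 := by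
  intro list n i _ hpre
  unfold Spec_heap2 heap2 heap2_alt
  rcases hpre with ⟨hi, hn⟩ | h2
  · exact heap2Go_eq_path (list.length + 1) list n i hi hn
  · -- no child inside the heap: both sides return (list, 0, 0)
    have hl : ¬ (2*i + 1 < n) := by omega
    have hr : ¬ (2*i + 2 < n) := by omega
    simp [heap2Go, heap2AltPath, hl, hr]
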